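-- pv_equiv track=rewrite | github.com/gomoura/Automate-IBM-i-Access-Client | sheets.py | telas_a_criar
-- ===== SOURCE A (Python) =====
-- def sheet2_valor_s_null(sheet1_xml_telas_,sheet2_xml_campos_,sheet2_valor_telas_): #Devolve o valor de cada campo da sheet 2 destacando os campos em branco
--
--
--     sht2_val_celula_temp = []
--     sht2_val_celula = [] #variavel final
--
--     for index1, valor1  in enumerate(sheet2_xml_campos_): # Fazendo o script percorrer todas as colunas da SHEET2
--         for index2, valor2 in enumerate(sheet1_xml_telas_): # Fazendo o script percorrer todas as colunas da SHEET2
--             #if sheet2_valor[index1][index2] != "null":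
--             if sheet2_valor_telas_[index1][index2] != 'null':
--
--                 sht2_val_celula_temp.append(valor2)
--
--         sht2_val_celula.append(sht2_val_celula_temp[:])
--         sht2_val_celula_temp.clear()
--
--     return sht2_val_celula
--
-- def telas_a_criar(unindo_tela_valor_,sheet1_xml_telas_,sheet2_xml_campos_,sheet2_valor_telas_):
--     telas = []
--     telasTemp = []
--
--     sheet2_valor_s_null_ = sheet2_valor_s_null(sheet1_xml_telas_,sheet2_xml_campos_,sheet2_valor_telas_)
--
--     for indice0,valor0 in enumerate(unindo_tela_valor_):
--         for indice1, valor1 in enumerate(sheet2_valor_s_null_[indice0]):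
--             telasTemp.append(valor1[0])
--         telas.append(telasTemp[:])
--         telasTemp.clear()
--     return telas
-- ===== SOURCE B (Python) =====
-- def telas_a_criar(unindo_tela_valor_, sheet1_xml_telas_, sheet2_xml_campos_, sheet2_valor_telas_):
--     return [
--         [row[0] for i2, row in enumerate(sheet1_xml_telas_)
--          if sheet2_valor_telas_[i0][i2] != 'null']
--         for i0 in range(len(unindo_tela_valor_))
--     ]
-- ===== Notes on version B (the rewrite author's own statement) =====
-- stated objective: simpler
-- what changed: Inlines the helper and fuses the two passes: one comprehension per screen selects sheet1_xml_telas_[i2][0] directly where sheet2_valor_telas_[i0][i2] != 'null', dropping the intermediate list-of-full-rows built for every column of sheet2_xml_campos_ and the append/clear temp-list machinery.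
import Mathlib
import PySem

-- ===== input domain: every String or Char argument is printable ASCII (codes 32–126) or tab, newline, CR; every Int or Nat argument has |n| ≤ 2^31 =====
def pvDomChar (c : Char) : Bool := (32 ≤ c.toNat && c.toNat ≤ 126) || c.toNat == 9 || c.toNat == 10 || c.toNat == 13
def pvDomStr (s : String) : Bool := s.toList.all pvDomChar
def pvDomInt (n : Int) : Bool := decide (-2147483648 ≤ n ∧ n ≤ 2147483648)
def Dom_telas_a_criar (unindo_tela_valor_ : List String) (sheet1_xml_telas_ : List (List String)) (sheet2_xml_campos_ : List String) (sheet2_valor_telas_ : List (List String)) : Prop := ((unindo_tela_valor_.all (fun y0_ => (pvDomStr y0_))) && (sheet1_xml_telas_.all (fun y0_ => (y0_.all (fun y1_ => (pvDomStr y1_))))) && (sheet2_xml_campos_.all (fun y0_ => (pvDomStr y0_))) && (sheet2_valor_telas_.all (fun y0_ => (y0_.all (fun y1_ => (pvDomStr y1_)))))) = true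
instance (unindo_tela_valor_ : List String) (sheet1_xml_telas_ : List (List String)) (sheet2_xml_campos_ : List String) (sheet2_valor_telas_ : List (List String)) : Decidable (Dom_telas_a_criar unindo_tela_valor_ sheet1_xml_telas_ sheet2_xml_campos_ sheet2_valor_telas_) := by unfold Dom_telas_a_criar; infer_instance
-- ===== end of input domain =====

-- ===== PORT A =====
-- B inlines the helper and fuses the two passes into one comprehension per screen (objective: simpler).
-- helper sheet2_valor_s_null of A, transliterated
def pvS2vsn (sheet1_xml_telas_ : List (List String)) (sheet2_xml_campos_ : List String) (sheet2_valor_telas_ : List (List String)) : List (List (List String)) :=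
  (PySem.List.enumerate sheet2_xml_campos_).foldl (fun acc p =>
    let temp := (PySem.List.enumerate sheet1_xml_telas_).foldl (fun t q =>
      if PySem.List.pyGetD (PySem.List.pyGetD sheet2_valor_telas_ p.1 []) q.1 "" ≠ "null"
      then t ++ [q.2] else t) ([] : List (List String))
    acc ++ [temp]) []

def telas_a_criar (unindo_tela_valor_ : List String) (sheet1_xml_telas_ : List (List String)) (sheet2_xml_campos_ : List String) (sheet2_valor_telas_ : List (List String)) : List (List String) :=
  let s := pvS2vsn sheet1_xml_telas_ sheet2_xml_campos_ sheet2_valor_telas_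
  (PySem.List.enumerate unindo_tela_valor_).foldl (fun acc p =>
    let temp := (PySem.List.enumerate (PySem.List.pyGetD s p.1 [])).foldl
      (fun t q => t ++ [PySem.List.pyGetD q.2 (0 : Int) ""]) ([] : List String)
    acc ++ [temp]) []

-- ===== PORT B =====
def telas_a_criar_alt (unindo_tela_valor_ : List String) (sheet1_xml_telas_ : List (List String)) (sheet2_xml_campos_ : List String) (sheet2_valor_telas_ : List (List String)) : List (List String) :=
  (List.range unindo_tela_valor_.length).map (fun i0 =>
    (PySem.List.enumerate sheet1_xml_telas_).filterMap (fun q =>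
      if PySem.List.pyGetD (PySem.List.pyGetD sheet2_valor_telas_ ((i0 : Nat) : Int) []) q.1 "" ≠ "null"
      then some (PySem.List.pyGetD q.2 (0 : Int) "") else none))

-- ===== PRECONDITION & SPEC =====
-- Pre_ = exactly the inputs on which Python A returns (no IndexError): every of the first
-- len(campos) value rows exists and covers sheet1 (unless sheet1 is empty), there are at least
-- len(unindo) screens, and every selected row of the first len(unindo) screens is nonempty.
def Pre_telas_a_criar (unindo_tela_valor_ : List String) (sheet1_xml_telas_ : List (List String)) (sheet2_xml_campos_ : List String) (sheet2_valor_telas_ : List (List String)) : Prop :=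
  unindo_tela_valor_.length ≤ sheet2_xml_campos_.length ∧
  (sheet1_xml_telas_ = [] ∨ ∀ i1 < sheet2_xml_campos_.length,
      i1 < sheet2_valor_telas_.length ∧
      sheet1_xml_telas_.length ≤ (sheet2_valor_telas_.getD i1 []).length) ∧
  (∀ i0 < unindo_tela_valor_.length, ∀ i2 < sheet1_xml_telas_.length,
      (sheet2_valor_telas_.getD i0 []).getD i2 "" ≠ "null" → sheet1_xml_telas_.getD i2 [] ≠ [])
instance (unindo_tela_valor_ : List String) (sheet1_xml_telas_ : List (List String)) (sheet2_xml_campos_ : List String) (sheet2_valor_telas_ : List (List String)) : Decidable (Pre_telas_a_criar unindo_tela_valor_ sheet1_xml_telas_ sheet2_xml_campos_ sheet2_valor_telas_) := by unfold Pre_telas_a_criar; infer_instance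

def pvWitness_telas_a_criar : List String × List (List String) × List String × List (List String) :=
  (["t1"], [["a", "b"], ["c"]], ["f1", "f2"], [["x", "null"], ["null", "y"]])

def Spec_telas_a_criar (unindo_tela_valor_ : List String) (sheet1_xml_telas_ : List (List String)) (sheet2_xml_campos_ : List String) (sheet2_valor_telas_ : List (List String)) (out : List (List String)) : Prop := out = telas_a_criar_alt unindo_tela_valor_ sheet1_xml_telas_ sheet2_xml_campos_ sheet2_valor_telas_
instance (unindo_tela_valor_ : List String) (sheet1_xml_telas_ : List (List String)) (sheet2_xml_campos_ : List String) (sheet2_valor_telas_ : List (List String)) (out : List (List String)) : Decidable (Spec_telas_a_criar unindo_tela_valor_ sheet1_xml_telas_ sheet2_xml_campos_ sheet2_valor_telas_ out) := by unfold Spec_telas_a_criar; infer_instance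

-- ===== CLAIM (what is proved, stated in full; the proofs are below) =====
def Claim_equal_telas_a_criar : Prop := ∀ (unindo_tela_valor_ : List String) (sheet1_xml_telas_ : List (List String)) (sheet2_xml_campos_ : List String) (sheet2_valor_telas_ : List (List String)), Dom_telas_a_criar unindo_tela_valor_ sheet1_xml_telas_ sheet2_xml_campos_ sheet2_valor_telas_ → Pre_telas_a_criar unindo_tela_valor_ sheet1_xml_telas_ sheet2_xml_campos_ sheet2_valor_telas_ → Spec_telas_a_criar unindo_tela_valor_ sheet1_xml_telas_ sheet2_xml_campos_ sheet2_valor_telas_ (telas_a_criar unindo_tela_valor_ sheet1_xml_telas_ sheet2_xml_campos_ sheet2_valor_telas_)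


-- ===== LEMMAS AND PROOFS =====

-- filterMap with an if-some/none body is filter-then-map
theorem pv_filterMap_ite {α β : Type} (p : α → Prop) [DecidablePred p] (f : α → β) (l : List α) :
    l.filterMap (fun x => if p x then some (f x) else none)
      = (l.filter (fun x => decide (p x))).map f := by
  induction l with
  | nil => rfl
  | cons a l ih =>
    by_cases h : p a <;> simp [h, ih]

-- mapping a function of the second component over an enumeration
theorem pv_map_snd_enum {α β : Type} (f : α → β) (xs : List α) (s : Int) :
    (PySem.List.enumerate xs s).map (fun q => f q.2) = xs.map f := by
  have : (fun q : Int × α => f q.2) = f ∘ (fun q : Int × α => q.2) := rfl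
  rw [this, ← List.map_map, PySem.List.map_snd_enumerate]

-- characterisation of A's helper
theorem pvS2vsn_eq (s1 : List (List String)) (campos : List String) (valor : List (List String)) :
    pvS2vsn s1 campos valor
      = (PySem.List.enumerate campos).map (fun p =>
          ((PySem.List.enumerate s1).filter
              (fun q => decide (PySem.List.pyGetD (PySem.List.pyGetD valor p.1 []) q.1 "" ≠ "null"))).map
            (fun q => q.2)) := by
  unfold pvS2vsn
  rw [show (fun (acc : List (List (List String))) (p : Int × String) =>
        let temp := (PySem.List.enumerate s1).foldl (fun t q =>
          if PySem.List.pyGetD (PySem.List.pyGetD valor p.1 []) q.1 "" ≠ "null"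
          then t ++ [q.2] else t) ([] : List (List String))
        acc ++ [temp])
      = (fun acc p => acc ++ [((PySem.List.enumerate s1).filter
            (fun q => decide (PySem.List.pyGetD (PySem.List.pyGetD valor p.1 []) q.1 "" ≠ "null"))).map
          (fun q => q.2)]) from by
    funext acc p
    simp only []
    rw [PySem.List.foldl_append_ite (p := fun q : Int × List String =>
      PySem.List.pyGetD (PySem.List.pyGetD valor p.1 []) q.1 "" ≠ "null") (f := fun q => q.2)]
    simp]
  rw [PySem.List.foldl_append_singleton_eq_map]
  simp

-- ===== VERDICT (by name: the statement is the Claim_ definition above) =====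
theorem telas_a_criar_spec : Claim_equal_telas_a_criar := by
  intro u s1 campos valor _ hpre
  obtain ⟨hlen, _, _⟩ := hpre
  unfold Spec_telas_a_criar telas_a_criar telas_a_criar_alt
  simp only [pvS2vsn_eq]
  rw [PySem.List.foldl_append_singleton_eq_map, List.nil_append]
  apply List.ext_getElem
  · simp [PySem.List.length_enumerate]
  · intro i hi hi'
    simp only [List.getElem_map, PySem.List.getElem_enumerate, List.getElem_range]
    have hiu : i < u.length := by
      simpa [PySem.List.length_enumerate] using hi
    have hic : i < campos.length := lt_of_lt_of_le hiu hlen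
    rw [PySem.List.foldl_append_singleton_eq_map, List.nil_append]
    rw [show ((0 : Int) + (i : Int)) = ((i : Nat) : Int) from by omega]
    rw [PySem.List.pyGetD_natCast]
    rw [List.getD_eq_getElem?_getD, List.getElem?_map,
        PySem.List.getElem?_enumerate]
    have hcam : campos[i]? = some campos[i] := List.getElem?_eq_getElem hic
    rw [hcam]
    simp only [Option.map_some, Option.getD_some]
    rw [pv_filterMap_ite (p := fun q : Int × List String =>
          PySem.List.pyGetD (PySem.List.pyGetD valor ((i : Nat) : Int) []) q.1 "" ≠ "null")
        (f := fun q => PySem.List.pyGetD q.2 (0 : Int) "")]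
    rw [pv_map_snd_enum (f := fun r : List String => PySem.List.pyGetD r (0 : Int) "")
        (xs := (PySem.List.enumerate s1 0).filter _ |>.map (fun q => q.2))]
    simp [List.map_map]
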